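-- pv_equiv track=rewrite | github.com/supermepsipax/imaging.heart | visualizations/visualize_3d.py | get_edge_hierarchy_color
-- ===== SOURCE A (Python) =====
-- def get_edge_hierarchy_color(edge_position_label):
--     """
--     Determines color based on edge position label for hierarchical visualization.
--
--     Args:
--         edge_position_label (str): The edge position label (e.g., "1", "12", "121", "122")
--
--     Returns:
--         str: Color name for the edge
--             - Main branch (all 1s): 'blue'
--             - Next main (1 followed by all 2s): 'orange'
--             - Other branches: 'green'
--     """
--     if not edge_position_label:
--         return 'gray'  # Default for unlabeled edges
--
--     # Check if all characters are '1' (main trunk)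
--     if all(c == '1' for c in edge_position_label):
--         return 'blue'
--
--     # Check if first char is '1' and rest are all '2' (next main branch)
--     if len(edge_position_label) > 1 and edge_position_label[0] == '1' and all(c == '2' for c in edge_position_label[1:]):
--         return 'orange'
--
--     # All other branches
--     return 'green'
-- ===== SOURCE B (Python) =====
-- # Single-pass table-driven DFA: states 0=start, 1=one '1', 2=two-or-more '1's,
-- # 3=one '1' then '2's, 4=reject; the final state is mapped to a color.
-- _TRANS = {(0, '1'): 1, (1, '1'): 2, (1, '2'): 3, (2, '1'): 2, (3, '2'): 3}
-- _COLOR = {0: 'gray', 1: 'blue', 2: 'blue', 3: 'orange', 4: 'green'}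
--
-- def get_edge_hierarchy_color(edge_position_label):
--     state = 0
--     for c in edge_position_label:
--         state = _TRANS.get((state, c), 4)
--     return _COLOR[state]
-- ===== Notes on version B (the rewrite author's own statement) =====
-- stated objective: alternative
-- what changed: B replaces A's staged all(...) character scans and branch logic by a single-pass table-driven finite automaton: one fold over the characters through a transition table keyed by (state, char), with the color read off the final state.
import Mathlib
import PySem

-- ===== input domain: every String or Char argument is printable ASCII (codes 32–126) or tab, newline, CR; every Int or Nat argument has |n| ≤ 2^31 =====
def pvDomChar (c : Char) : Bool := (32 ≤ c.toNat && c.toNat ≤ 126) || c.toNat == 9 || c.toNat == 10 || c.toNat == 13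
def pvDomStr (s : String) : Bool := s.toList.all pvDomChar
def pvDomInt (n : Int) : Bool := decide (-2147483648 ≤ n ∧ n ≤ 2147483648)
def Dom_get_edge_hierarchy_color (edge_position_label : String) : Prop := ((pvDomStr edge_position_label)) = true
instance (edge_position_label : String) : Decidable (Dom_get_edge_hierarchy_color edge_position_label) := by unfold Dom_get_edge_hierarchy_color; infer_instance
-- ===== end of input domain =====

-- ===== PORT A =====
-- one honest line: B is a single-pass table-driven DFA (fold to a final state, color from the state) instead of A's staged all(...) scans; alternative structure, same cost
def get_edge_hierarchy_color (edge_position_label : String) : String :=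
  if edge_position_label.toList = [] then "gray"
  else if edge_position_label.toList.all (fun c => c = '1') then "blue"
  else if decide (edge_position_label.toList.length > 1) &&
          (PySem.List.pyGet? edge_position_label.toList 0 = some '1') &&
          (edge_position_label.toList.drop 1).all (fun c => c = '2') then "orange"
  else "green"

-- ===== PORT B =====
-- DFA transition table (_TRANS.get with default 4) and final-state color table (_COLOR)
def pvStep (s : Nat) (c : Char) : Nat :=
  if s = 0 ∧ c = '1' then 1
  else if s = 1 ∧ c = '1' then 2
  else if s = 1 ∧ c = '2' then 3
  else if s = 2 ∧ c = '1' then 2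
  else if s = 3 ∧ c = '2' then 3
  else 4

def pvColor (s : Nat) : String :=
  match s with
  | 0 => "gray"
  | 1 => "blue"
  | 2 => "blue"
  | 3 => "orange"
  | _ => "green"

def get_edge_hierarchy_color_alt (edge_position_label : String) : String :=
  pvColor (edge_position_label.toList.foldl pvStep 0)

-- ===== PRECONDITION & SPEC =====
def Spec_get_edge_hierarchy_color (edge_position_label : String) (out : String) : Prop := out = get_edge_hierarchy_color_alt edge_position_label
instance (edge_position_label : String) (out : String) : Decidable (Spec_get_edge_hierarchy_color edge_position_label out) := by unfold Spec_get_edge_hierarchy_color; infer_instance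

-- ===== CLAIM =====
def Claim_equal_get_edge_hierarchy_color : Prop := ∀ (edge_position_label : String), Dom_get_edge_hierarchy_color edge_position_label → Spec_get_edge_hierarchy_color edge_position_label (get_edge_hierarchy_color edge_position_label)

-- ===== LEMMAS AND PROOFS =====
set_option maxRecDepth 4000
theorem foldl_step4 (l : List Char) : l.foldl pvStep 4 = 4 := by
  induction l with
  | nil => rfl
  | cons c r ih => simpa [List.foldl, pvStep] using ih

theorem foldl_step2 (l : List Char) :
    l.foldl pvStep 2 = if l.all (fun c => c = '1') then 2 else 4 := by
  induction l with
  | nil => rfl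
  | cons c r ih =>
    by_cases h : c = '1'
    · subst h; simpa [List.foldl, pvStep] using ih
    · have hs : pvStep 2 c = 4 := by
        unfold pvStep
        split <;> simp_all
      simp [List.foldl, hs, foldl_step4, List.all_cons, h]

theorem foldl_step3 (l : List Char) :
    l.foldl pvStep 3 = if l.all (fun c => c = '2') then 3 else 4 := by
  induction l with
  | nil => rfl
  | cons c r ih =>
    by_cases h : c = '2'
    · subst h; simpa [List.foldl, pvStep] using ih
    · have hs : pvStep 3 c = 4 := by
        unfold pvStep
        split <;> simp_all
      simp [List.foldl, hs, foldl_step4, List.all_cons, h]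

-- ===== VERDICT =====
theorem get_edge_hierarchy_color_spec : Claim_equal_get_edge_hierarchy_color := by
  intro s _
  unfold Spec_get_edge_hierarchy_color get_edge_hierarchy_color get_edge_hierarchy_color_alt
  cases hL : s.toList with
  | nil => rfl
  | cons h rest =>
    by_cases h1 : h = '1'
    · subst h1
      have hstep : pvStep 0 '1' = 1 := rfl
      cases rest with
      | nil => simp [List.foldl, hstep, pvColor]
      | cons c r =>
        by_cases hc1 : c = '1'
        · subst hc1
          have : pvStep 1 '1' = 2 := rfl
          simp [List.foldl, hstep, this, foldl_step2, PySem.List.pyGet?, PySem.List.pyIdx?,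
            List.all_cons]
          split <;> rfl
        · by_cases hc2 : c = '2'
          · subst hc2
            have h3 : pvStep 1 '2' = 3 := rfl
            have hB : (('1' : Char) :: '2' :: r).foldl pvStep 0
                = if r.all (fun c => c = '2') then 3 else 4 := by
              rw [List.foldl_cons, hstep, List.foldl_cons, h3, foldl_step3]
            rw [hB]
            by_cases hr : r.all (fun c => c = '2') = true
            · simp [hr, List.all_cons, PySem.List.pyGet?, PySem.List.pyIdx?, pvColor]
              have hnn : (0:Int) ≤ (r.length : Int) + 1 := by positivity
              simp [hnn]
            · simp [hr, List.all_cons, PySem.List.pyGet?, PySem.List.pyIdx?, pvColor]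
          · have hs : pvStep 1 c = 4 := by
              unfold pvStep; split_ifs <;> simp_all
            have hB : pvColor ((('1' : Char) :: c :: r).foldl pvStep 0) = "green" := by
              rw [List.foldl_cons, hstep, List.foldl_cons, hs, foldl_step4]
              rfl
            rw [hB]
            simp [List.all_cons, hc1, hc2, PySem.List.pyGet?, PySem.List.pyIdx?]
    · have hs : pvStep 0 h = 4 := by
        unfold pvStep; split_ifs <;> simp_all
      simp [List.foldl, hs, foldl_step4, PySem.List.pyGet?, PySem.List.pyIdx?,
        List.all_cons, h1, pvColor]
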